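-- pv_equiv track=rewrite | github.com/patrickdugan/AI_Diplomacy | scripts/storyworlds/enforce_pvalue_reaction_depth.py | choose_property_id
-- ===== SOURCE A (Python) =====
-- from typing import Any, Dict, Iterable, List, Optional, Tuple
--
-- def choose_property_id(data: Dict[str, Any], preferred_tokens: Tuple[str, ...], fallback: Optional[str]) -> Optional[str]:
--     authored = data.get("authored_properties", []) or []
--     candidates = [str(prop.get("id", "")) for prop in authored if isinstance(prop, dict) and prop.get("id")]
--
--     for token in preferred_tokens:
--         for cid in candidates:
--             if token in cid.lower():
--                 return cid
--     return fallback
-- ===== SOURCE B (Python) =====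
-- def choose_property_id(data, preferred_tokens, fallback):
--     authored = data.get("authored_properties", []) or []
--     sentinel = len(preferred_tokens)
--     best_score = sentinel
--     best = None
--     for prop in authored:
--         if not (isinstance(prop, dict) and prop.get("id")):
--             continue
--         cid = str(prop.get("id", ""))
--         low = cid.lower()
--         score = next((i for i, t in enumerate(preferred_tokens) if t in low), sentinel)
--         if score < best_score:
--             best_score = score
--             best = cid
--     return best if best is not None else fallback
-- ===== Notes on version B (the rewrite author's own statement) =====
-- stated objective: alternative
-- what changed: Replaces A's token-major nested scan with early return by a candidate-major single pass that scores each candidate (index of the first preferred token it contains, sentinel if none) and keeps the minimal (score, position) candidate, falling back when no candidate scored below the sentinel.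
import Mathlib
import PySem

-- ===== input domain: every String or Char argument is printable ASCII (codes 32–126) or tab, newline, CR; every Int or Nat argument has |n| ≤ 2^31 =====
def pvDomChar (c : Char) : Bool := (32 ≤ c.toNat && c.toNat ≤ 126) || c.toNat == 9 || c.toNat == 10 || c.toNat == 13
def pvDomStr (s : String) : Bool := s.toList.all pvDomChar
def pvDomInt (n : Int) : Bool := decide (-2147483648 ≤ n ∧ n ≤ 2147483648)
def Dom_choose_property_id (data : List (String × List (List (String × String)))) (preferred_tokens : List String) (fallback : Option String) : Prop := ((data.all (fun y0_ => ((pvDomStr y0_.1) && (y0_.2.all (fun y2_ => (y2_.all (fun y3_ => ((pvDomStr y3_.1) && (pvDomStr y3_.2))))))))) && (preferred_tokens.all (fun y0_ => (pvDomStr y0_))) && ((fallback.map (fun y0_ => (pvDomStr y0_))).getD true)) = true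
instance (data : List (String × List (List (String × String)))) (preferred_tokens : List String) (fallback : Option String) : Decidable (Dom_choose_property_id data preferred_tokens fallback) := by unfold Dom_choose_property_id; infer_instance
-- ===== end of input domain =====

-- B replaces A's token-major nested scan (early return) by a candidate-major single pass
-- keeping the minimal (token-score, position) candidate; same return value, alternative structure.


-- ===== PORT A =====
-- 'str(prop.get("id",""))' kept when 'prop.get("id")' is truthy (a non-empty string), else skipped
def pvCandOf (prop : List (String × String)) : Option String :=
  if PySem.Dict.getD ⟨prop⟩ "id" "" ≠ "" then some (PySem.Dict.getD ⟨prop⟩ "id" "") else none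

-- for token in preferred_tokens: for cid in candidates: if token in cid.lower(): return cid
def pvA_loop (preferred_tokens : List String) (candidates : List String) : Option String :=
  match preferred_tokens with
  | [] => none
  | token :: rest =>
    match candidates.find? (fun cid => PySem.Str.isIn token (PySem.Str.lower cid)) with
    | some cid => some cid
    | none => pvA_loop rest candidates

def choose_property_id (data : List (String × List (List (String × String)))) (preferred_tokens : List String) (fallback : Option String) : Option String :=
  let authored0 := PySem.Dict.getD ⟨data⟩ "authored_properties" []
  let authored := if authored0 = [] then [] else authored0   -- `or []`
  let candidates := authored.filterMap pvCandOf
  match pvA_loop preferred_tokens candidates with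
  | some cid => some cid
  | none => fallback

-- ===== PORT B =====
-- score of a candidate: index of the first token contained in `low`, = length when none
def pvB_score (preferred_tokens : List String) (low : String) : Nat :=
  match preferred_tokens with
  | [] => 0
  | t :: ts => if PySem.Str.isIn t low then 0 else 1 + pvB_score ts low

def pvB_step (preferred_tokens : List String) (st : Nat × Option String)
    (prop : List (String × String)) : Nat × Option String :=
  match pvCandOf prop with
  | none => st
  | some cid =>
    let score := pvB_score preferred_tokens (PySem.Str.lower cid)
    if score < st.1 then (score, some cid) else st

def choose_property_id_alt (data : List (String × List (List (String × String)))) (preferred_tokens : List String) (fallback : Option String) : Option String :=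
  let authored0 := PySem.Dict.getD ⟨data⟩ "authored_properties" []
  let authored := if authored0 = [] then [] else authored0   -- `or []`
  let st := authored.foldl (pvB_step preferred_tokens) (preferred_tokens.length, none)
  match st.2 with
  | some cid => some cid
  | none => fallback

-- ===== PRECONDITION & SPEC =====
def Spec_choose_property_id (data : List (String × List (List (String × String)))) (preferred_tokens : List String) (fallback : Option String) (out : Option String) : Prop := out = choose_property_id_alt data preferred_tokens fallback
instance (data : List (String × List (List (String × String)))) (preferred_tokens : List String) (fallback : Option String) (out : Option String) : Decidable (Spec_choose_property_id data preferred_tokens fallback out) := by unfold Spec_choose_property_id; infer_instance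

-- ===== CLAIM (what is proved, stated in full; the proofs are below) =====
def Claim_equal_choose_property_id : Prop := ∀ (data : List (String × List (List (String × String)))) (preferred_tokens : List String) (fallback : Option String), Dom_choose_property_id data preferred_tokens fallback → Spec_choose_property_id data preferred_tokens fallback (choose_property_id data preferred_tokens fallback)

-- ===== LEMMAS AND PROOFS =====

theorem pvA_loop_nil (ts : List String) : pvA_loop ts [] = none := by
  induction ts with
  | nil => rfl
  | cons t ts ih => simp [pvA_loop, ih]

theorem pvB_score_take (ts : List String) (low : String) (b : Nat) :
    pvB_score (ts.take b) low = min (pvB_score ts low) b := by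
  induction ts generalizing b with
  | nil => simp [pvB_score]
  | cons t ts ih =>
    cases b with
    | zero => simp [pvB_score]
    | succ b =>
      simp only [List.take_succ_cons, pvB_score]
      split
      · simp
      · rw [ih]; omega

-- head-candidate decomposition of A's nested loop
theorem pvA_loop_cons (ts : List String) (c : String) (cs : List String) :
    pvA_loop ts (c :: cs) =
      match pvA_loop (ts.take (pvB_score ts (PySem.Str.lower c))) cs with
      | some x => some x
      | none => if pvB_score ts (PySem.Str.lower c) < ts.length then some c else none := by
  induction ts with
  | nil => simp [pvA_loop, pvB_score]
  | cons t ts ih =>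
    by_cases h : PySem.Str.isIn t (PySem.Str.lower c) = true
    · have h' : PySem.Chars.isIn t.toList (PySem.Chars.lower c.toList) = true := by simpa using h
      have hs : pvB_score (t :: ts) (PySem.Str.lower c) = 0 := by simp [pvB_score, h']
      rw [hs, List.take_zero]
      have hfind : (c :: cs).find? (fun cid => PySem.Str.isIn t (PySem.Str.lower cid)) = some c :=
        List.find?_cons_of_pos h
      simp only [pvA_loop, hfind]
      simp
    · have h' : PySem.Str.isIn t (PySem.Str.lower c) = false := by
        cases hx : PySem.Str.isIn t (PySem.Str.lower c) <;> simp_all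
      simp only [pvB_score, h', if_false, Bool.false_eq_true]
      have htake : (t :: ts).take (1 + pvB_score ts (PySem.Str.lower c)) =
          t :: ts.take (pvB_score ts (PySem.Str.lower c)) := by
        rw [Nat.add_comm]; rfl
      rw [htake]
      simp only [pvA_loop, List.find?, h']
      cases hfind : cs.find? (fun cid => PySem.Str.isIn t (PySem.Str.lower cid)) with
      | some x => simp
      | none =>
        simp only [ih, List.length_cons]
        have : (1 + pvB_score ts (PySem.Str.lower c) < ts.length + 1) ↔
            (pvB_score ts (PySem.Str.lower c) < ts.length) := by omega
        cases hrec : pvA_loop (ts.take (pvB_score ts (PySem.Str.lower c))) cs with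
        | some x => simp
        | none => simp [this]

-- the fold from bound b returns A's answer on the first b tokens, else the carried state
theorem pvB_fold_eq (ts : List String) (props : List (List (String × String)))
    (b : Nat) (r : Option String) (hb : b ≤ ts.length) :
    (props.foldl (pvB_step ts) (b, r)).2 =
      match pvA_loop (ts.take b) (props.filterMap pvCandOf) with
      | some x => some x
      | none => r := by
  induction props generalizing b r with
  | nil => simp [pvA_loop_nil]
  | cons prop props ih =>
    rw [List.foldl_cons]
    cases hcand : pvCandOf prop with
    | none =>
      have hstep : pvB_step ts (b, r) prop = (b, r) := by simp [pvB_step, hcand]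
      rw [hstep, ih _ _ hb]
      simp [hcand]
    | some c =>
      have hstep : pvB_step ts (b, r) prop =
          if pvB_score ts (PySem.Str.lower c) < b
          then (pvB_score ts (PySem.Str.lower c), some c) else (b, r) := by
        simp [pvB_step, hcand]
      have hfilter : (prop :: props).filterMap pvCandOf = c :: props.filterMap pvCandOf := by
        simp [hcand]
      rw [hstep, hfilter, pvA_loop_cons]
      have hscore_take : pvB_score (ts.take b) (PySem.Str.lower c) =
          min (pvB_score ts (PySem.Str.lower c)) b := pvB_score_take ts _ b
      set s0 := pvB_score ts (PySem.Str.lower c) with hs0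
      by_cases hlt : s0 < b
      · rw [if_pos hlt, ih _ _ (le_trans (le_of_lt hlt) hb)]
        rw [hscore_take]
        have h1 : min s0 b = s0 := by omega
        rw [h1, List.take_take, h1]
        have h2 : s0 < (ts.take b).length := by simp [List.length_take]; omega
        rw [if_pos h2]
        cases pvA_loop (ts.take s0) (props.filterMap pvCandOf) <;> simp
      · rw [if_neg hlt, ih _ _ hb, hscore_take]
        have h1 : min s0 b = b := by omega
        rw [h1, List.take_take, Nat.min_self]
        have h2 : ¬ b < (ts.take b).length := by simp [List.length_take]
        rw [if_neg h2]
        cases pvA_loop (ts.take b) (props.filterMap pvCandOf) <;> simp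

-- ===== VERDICT (by name: the statement is the Claim_ definition above) =====
theorem choose_property_id_spec : Claim_equal_choose_property_id := by
  intro data ts fb _
  show choose_property_id data ts fb = choose_property_id_alt data ts fb
  simp only [choose_property_id, choose_property_id_alt]
  rw [pvB_fold_eq ts _ ts.length none (le_refl _), List.take_length]
  cases pvA_loop ts _ <;> rfl
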